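-- pv_equiv track=rewrite | github.com/zxc228/interesting-tasks-from-codewars | Catching Car Mileage Numbers.py | is_interesting
-- ===== SOURCE A (Python) =====
-- def is_interesting(number, awesome_phrases):
--     s = str(number)
--     if number < 98:
--         return 0
--     if number == 99 or number == 98:
--         return 1
--     k_null = 0
--     for i in range(1, len(s)):
--         if s[i] == '0':
--             k_null += 1
--
--     if k_null == len(s) - 1:
--         return 2
--
--     rev = s[::-1]
--     if rev == s:
--         return 2
--     k_seq = 0
--     for i in range(len(s) - 1):
--
--         if int(s[i]) + 1 == int(s[i + 1]):
--             k_seq += 1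
--         if int(s[i]) == 9 and int(s[i + 1]) == 0:
--             k_seq += 1
--
--     if k_seq == len(s) - 1:
--         return 2
--     k_seq = 0
--     for i in range(len(s) - 1):
--         if int(s[i]) == int(s[i + 1]) + 1:
--             k_seq += 1
--         if int(s[i]) == 9 and int(s[i + 1]) == 0:
--             k_seq += 1
--
--     if k_seq == len(s) - 1:
--         return 2
--     if awesome_phrases.count(number) > 0:
--         return 2
--     for q in range(1, 3):
--         number += 1
--         s = str(number)
--         k_null = 0
--         for i in range(1, len(s)):
--             if s[i] == '0':
--                 k_null += 1
--         if k_null == len(s) - 1: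
--             return 1
--
--         rev = s[::-1]
--
--         if rev == s:
--             return 1
--         k_seq = 0
--         for i in range(len(s) - 1):
--             if int(s[i]) + 1 == int(s[i + 1]):
--                 k_seq += 1
--             if int(s[i]) == 9 and int(s[i + 1]) == 0:
--                 k_seq += 1
--         if k_seq == len(s) - 1:
--             return 1
--         k_seq = 0
--         for i in range(len(s) - 1):
--             if int(s[i]) == int(s[i + 1]) + 1:
--                 k_seq += 1
--         if k_seq == len(s) - 1:
--             return 1
--
--         if awesome_phrases.count(number) > 0:
--             return 1
--     return 0
-- ===== SOURCE B (Python) =====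
-- _INC = '1234567890123456789'
-- _DEC = '9876543210'
--
--
-- def _interesting(n, phrases):
--     if n < 100:
--         return False
--     s = str(n)
--     return (s[1:] == '0' * (len(s) - 1)
--             or s == s[::-1]
--             or s in _INC
--             or s in _DEC
--             or n in phrases)
--
--
-- def is_interesting(number, awesome_phrases):
--     if _interesting(number, awesome_phrases):
--         return 2
--     if any(_interesting(number + d, awesome_phrases) for d in (1, 2)):
--         return 1
--     return 0
-- ===== Notes on version B (the rewrite author's own statement) =====
-- stated objective: idiomatic
-- what changed: A's five per-number digit checks (index loops counting matching adjacent pairs, plus 98/99 special cases and a duplicated check block inside the q-loop) are replaced by the classic pattern-string idiom: a single helper gated by n >= 100 that tests str(n) for substring membership in the fixed strings '1234567890123456789' and '9876543210' (and equality with '0'*(len-1) for roundness), so the adjacent-pair loops disappear; the driver is 2/1/0 over n, n+1, n+2.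
import Mathlib
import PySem

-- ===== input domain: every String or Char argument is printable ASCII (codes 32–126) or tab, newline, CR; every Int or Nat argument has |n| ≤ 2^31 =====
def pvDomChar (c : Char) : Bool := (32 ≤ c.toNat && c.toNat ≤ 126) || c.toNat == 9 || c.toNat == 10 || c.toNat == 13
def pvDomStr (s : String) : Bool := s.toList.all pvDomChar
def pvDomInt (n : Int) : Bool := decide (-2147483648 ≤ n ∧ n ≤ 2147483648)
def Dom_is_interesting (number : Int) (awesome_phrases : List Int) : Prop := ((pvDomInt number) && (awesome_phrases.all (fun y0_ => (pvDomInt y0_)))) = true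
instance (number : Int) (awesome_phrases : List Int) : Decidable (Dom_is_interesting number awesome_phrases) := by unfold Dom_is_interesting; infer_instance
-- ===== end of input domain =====

-- B replaces A's per-pair counter loops by substring membership of str(n) in the fixed pattern strings
-- '1234567890123456789' / '9876543210' (and '0'*(len-1) for roundness): objective 'idiomatic', same cost.

-- ===== PORT A =====
-- int(s[i]) in total form: in A it is reached only on digit chars of str(n) for n >= 100, where int() returns
def pvDv (c : Char) : Int := (PySem.Int.ofChars? [c]).getD 0

def pvA_kNull (s : List Char) : Int :=
  (PySem.List.pyRange 1 (PySem.List.len s) 1).foldl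
    (fun k i => if PySem.List.pyGetD s i ' ' = '0' then k + 1 else k) 0

def pvA_kInc (s : List Char) : Int :=
  (PySem.List.pyRange 0 (PySem.List.len s - 1) 1).foldl
    (fun k i =>
      let k := if pvDv (PySem.List.pyGetD s i ' ') + 1 = pvDv (PySem.List.pyGetD s (i + 1) ' ') then k + 1 else k
      if pvDv (PySem.List.pyGetD s i ' ') = 9 ∧ pvDv (PySem.List.pyGetD s (i + 1) ' ') = 0 then k + 1 else k) 0

def pvA_kDecWrap (s : List Char) : Int :=
  (PySem.List.pyRange 0 (PySem.List.len s - 1) 1).foldl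
    (fun k i =>
      let k := if pvDv (PySem.List.pyGetD s i ' ') = pvDv (PySem.List.pyGetD s (i + 1) ' ') + 1 then k + 1 else k
      if pvDv (PySem.List.pyGetD s i ' ') = 9 ∧ pvDv (PySem.List.pyGetD s (i + 1) ' ') = 0 then k + 1 else k) 0

def pvA_kDec (s : List Char) : Int :=
  (PySem.List.pyRange 0 (PySem.List.len s - 1) 1).foldl
    (fun k i =>
      if pvDv (PySem.List.pyGetD s i ' ') = pvDv (PySem.List.pyGetD s (i + 1) ' ') + 1 then k + 1 else k) 0

-- the body of A's `for q in range(1, 3)` loop: true = `return 1` fired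
def pvA_check1 (number : Int) (aws : List Int) : Bool :=
  let s := PySem.Int.toChars number
  if pvA_kNull s = PySem.List.len s - 1 then true
  else if (PySem.List.slice? s none none (-1)).getD [] = s then true
  else if pvA_kInc s = PySem.List.len s - 1 then true
  else if pvA_kDec s = PySem.List.len s - 1 then true
  else if PySem.List.count aws number > 0 then true
  else false

-- A's q-loop (two iterations, `number += 1` then the checks, `return 1` inside) is unrolled into its two iterations
def is_interesting (number : Int) (awesome_phrases : List Int) : Int :=
  let s := PySem.Int.toChars number
  if number < 98 then 0
  else if number = 99 ∨ number = 98 then 1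
  else if pvA_kNull s = PySem.List.len s - 1 then 2
  else if (PySem.List.slice? s none none (-1)).getD [] = s then 2
  else if pvA_kInc s = PySem.List.len s - 1 then 2
  else if pvA_kDecWrap s = PySem.List.len s - 1 then 2
  else if PySem.List.count awesome_phrases number > 0 then 2
  else if pvA_check1 (number + 1) awesome_phrases then 1
  else if pvA_check1 (number + 2) awesome_phrases then 1
  else 0

-- ===== PORT B =====
-- Source B's module constants _INC and _DEC
def pvINC : List Char := ['1','2','3','4','5','6','7','8','9','0','1','2','3','4','5','6','7','8','9']
def pvDEC : List Char := ['9','8','7','6','5','4','3','2','1','0']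

-- `'0' * (len(s) - 1)` is ported by hand as List.replicate (exact: a non-positive count gives the empty string)
def pvB_interesting (n : Int) (phrases : List Int) : Bool :=
  if n < 100 then false
  else
    let s := PySem.Int.toChars n
    decide (PySem.List.slice s (some 1) none = List.replicate (PySem.List.len s - 1).toNat '0')
    || decide (s = (PySem.List.slice? s none none (-1)).getD [])
    || PySem.Chars.isIn s pvINC
    || PySem.Chars.isIn s pvDEC
    || phrases.contains n

def is_interesting_alt (number : Int) (awesome_phrases : List Int) : Int :=
  if pvB_interesting number awesome_phrases then 2
  else if [(1 : Int), 2].any (fun d => pvB_interesting (number + d) awesome_phrases) then 1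
  else 0

-- ===== PRECONDITION & SPEC =====
def Spec_is_interesting (number : Int) (awesome_phrases : List Int) (out : Int) : Prop := out = is_interesting_alt number awesome_phrases
instance (number : Int) (awesome_phrases : List Int) (out : Int) : Decidable (Spec_is_interesting number awesome_phrases out) := by unfold Spec_is_interesting; infer_instance

-- ===== CLAIM (what is proved, stated in full; the proofs are below) =====
def Claim_equal_is_interesting : Prop := ∀ (number : Int) (awesome_phrases : List Int), Dom_is_interesting number awesome_phrases → Spec_is_interesting number awesome_phrases (is_interesting number awesome_phrases)

-- ===== LEMMAS AND PROOFS =====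

-- the pair predicates of A's adjacent-digit counters
def pvInc (p : Char × Char) : Bool := pvDv p.1 + 1 == pvDv p.2 || (pvDv p.1 == 9 && pvDv p.2 == 0)

def pvDecP (p : Char × Char) : Bool := pvDv p.1 == pvDv p.2 + 1

def pvDecW (p : Char × Char) : Bool := pvDv p.1 == pvDv p.2 + 1 || (pvDv p.1 == 9 && pvDv p.2 == 0)

-- every char of str(n) is a digit char
def pvDigitStr (s : List Char) : Prop := ∀ c ∈ s, ∃ k, k < 10 ∧ c = Nat.digitChar k

theorem pv_mem_toDigits (n : Nat) : ∀ c ∈ Nat.toDigits 10 n, ∃ k, k < 10 ∧ c = Nat.digitChar k := by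
  induction n using Nat.strong_induction_on with
  | _ n ih =>
    intro c hc
    rw [Nat.toDigits_eq_if (by norm_num)] at hc
    split at hc
    · rename_i hlt
      simp at hc
      exact ⟨n, hlt, hc⟩
    · rename_i hge
      rcases List.mem_append.1 hc with h | h
      · exact ih (n / 10) (Nat.div_lt_self (by omega) (by norm_num)) c h
      · simp at h
        exact ⟨n % 10, Nat.mod_lt _ (by norm_num), h⟩

theorem pv_toChars_eq (n : Int) (h : 0 ≤ n) : PySem.Int.toChars n = Nat.toDigits 10 n.toNat := by
  simp [PySem.Int.toChars, not_lt.2 h]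

theorem pv_digitStr (n : Int) (h : 0 ≤ n) : pvDigitStr (PySem.Int.toChars n) := by
  rw [pv_toChars_eq n h]; exact pv_mem_toDigits n.toNat

theorem pv_len3 (n : Int) (h : 100 ≤ n) : 3 ≤ (PySem.Int.toChars n).length := by
  rw [pv_toChars_eq n (by omega)]
  by_contra hlen
  have h2 : (Nat.toDigits 10 n.toNat).length ≤ 2 := by omega
  have := (Nat.length_toDigits_le_iff (by norm_num) (by norm_num)).1 h2
  omega

theorem pv_len10 (n : Int) (h0 : 0 ≤ n) (h : n ≤ 2147483650) : (PySem.Int.toChars n).length ≤ 10 := by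
  rw [pv_toChars_eq n h0]
  exact (Nat.length_toDigits_le_iff (by norm_num) (by norm_num)).2 (by omega)

theorem pv_dv_digitChar : ∀ k, k < 10 → pvDv (Nat.digitChar k) = (k : Int) := by decide

theorem pv_dv_bounds (n : Int) (h : 0 ≤ n) : ∀ c ∈ PySem.Int.toChars n, 0 ≤ pvDv c ∧ pvDv c ≤ 9 := by
  intro c hc
  obtain ⟨k, hk, rfl⟩ := pv_digitStr n h c hc
  rw [pv_dv_digitChar k hk]
  omega

theorem pv_kNull_eq (s : List Char) :
    pvA_kNull s = (List.countP (fun c => c == '0') s.tail : Int) := by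
  unfold pvA_kNull
  rw [PySem.List.foldl_pyRange_pyGetD s ' ' (fun k c => if c = '0' then k + 1 else k) 0 (a := 1) (by omega)]
  simp only [show (fun (k : Int) (c : Char) => if c = '0' then k + 1 else k)
      = (fun (k : Int) (c : Char) => if (c == '0') = true then k + 1 else k) by
    funext k c; simp]
  rw [PySem.List.foldl_count_if]
  simp [List.drop_one]

theorem pv_pair_fold (s : List Char) (g : Char × Char → Bool)
    (body : Int → Int → Int)
    (hbody : ∀ (k : Int) (i : Int), 0 ≤ i → i < ((s.zip s.tail).length : Int) →
      body k i = if g (PySem.List.pyGetD s i ' ', PySem.List.pyGetD s (i + 1) ' ') then k + 1 else k) :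
    (PySem.List.pyRange 0 (PySem.List.len s - 1) 1).foldl body 0
      = (List.countP g (s.zip s.tail) : Int) := by
  rcases s with _ | ⟨c, t⟩
  · rw [PySem.List.pyRange_one_eq_nil (by simp [PySem.List.len])]
    simp
  · have hlen : (t.length : Int) = PySem.List.len (c :: t) - 1 := by
      simp [PySem.List.len_eq]
    have hz : ((c :: t).zip (c :: t).tail).length = t.length := by
      simp [List.length_zip]
    have hrange : PySem.List.pyRange 0 (PySem.List.len (c :: t) - 1) 1
        = PySem.List.pyRange 0 (((c :: t).zip (c :: t).tail).length : Int) 1 := by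
      rw [hz, hlen]
    rw [hrange]
    rw [PySem.List.foldl_congr_mem _ body
      (fun k i => (fun k p => if g p then k + 1 else k) k (PySem.List.pyGetD ((c :: t).zip (c :: t).tail) i (' ', ' '))) 0 ?_]
    · rw [PySem.List.foldl_pyRange_zero_pyGetD' ((c :: t).zip (c :: t).tail) (' ', ' ')
        (fun k p => if g p then k + 1 else k) 0]
      rw [PySem.List.foldl_count_if]
      omega
    · intro k i hi
      have hmem := (PySem.List.mem_pyRange_one).1 hi
      have h0 : 0 ≤ i := hmem.1
      have h1 : i < (((c :: t).zip (c :: t).tail).length : Int) := hmem.2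
      rw [hbody k i h0 h1]
      have hgz : PySem.List.pyGetD ((c :: t).zip (c :: t).tail) i (' ', ' ')
          = (PySem.List.pyGetD (c :: t) i ' ', PySem.List.pyGetD (c :: t) (i + 1) ' ') := by
        rw [PySem.List.pyGetD_eq_getElem _ _ h0 (by exact_mod_cast h1),
            PySem.List.pyGetD_eq_getElem _ _ h0 (by simp [hz] at h1 ⊢; omega),
            PySem.List.pyGetD_eq_getElem _ _ (by omega) (by simp [hz] at h1 ⊢; omega)]
        rw [List.getElem_zip]
        have : (i + 1).toNat = i.toNat + 1 := by omega
        simp [List.getElem_tail, this]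
      dsimp only
      rw [hgz]

theorem pv_kInc_eq (s : List Char) : pvA_kInc s = (List.countP pvInc (s.zip s.tail) : Int) := by
  unfold pvA_kInc
  apply pv_pair_fold
  intro k i _ _
  dsimp only [pvInc]
  set a := pvDv (PySem.List.pyGetD s i ' ') with ha
  set b := pvDv (PySem.List.pyGetD s (i + 1) ' ') with hb
  split_ifs with h1 h2 h3 h4 <;> simp_all <;> try omega

theorem pv_kDecW_eq (s : List Char) : pvA_kDecWrap s = (List.countP pvDecW (s.zip s.tail) : Int) := by
  unfold pvA_kDecWrap
  apply pv_pair_fold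
  intro k i _ _
  dsimp only [pvDecW]
  split_ifs with h1 h2 h3 h4 <;> simp_all <;> try omega

theorem pv_kDec_eq (s : List Char) : pvA_kDec s = (List.countP pvDecP (s.zip s.tail) : Int) := by
  unfold pvA_kDec
  apply pv_pair_fold
  intro k i _ _
  dsimp only [pvDecP]
  split_ifs with h1 h2 <;> simp_all

theorem pv_count_all (s : List Char) (hs : s ≠ []) (g : Char × Char → Bool) :
    ((List.countP g (s.zip s.tail) : Int) = PySem.List.len s - 1) ↔ (s.zip s.tail).all g = true := by
  have hz : (s.zip s.tail).length = s.length - 1 := by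
    rcases s with _ | ⟨c, t⟩
    · simp at hs
    · simp [List.length_zip]
  have hle := List.countP_le_length (p := g) (l := s.zip s.tail)
  have hlen : PySem.List.len s = (s.length : Int) := PySem.List.len_eq s
  have hpos : 1 ≤ s.length := by
    rcases s with _ | _
    · simp at hs
    · simp
  constructor
  · intro h
    have : List.countP g (s.zip s.tail) = (s.zip s.tail).length := by omega
    rw [List.all_eq_true]
    exact fun x hx => (List.countP_eq_length.1 this) x hx
  · intro h
    have : List.countP g (s.zip s.tail) = (s.zip s.tail).length :=
      List.countP_eq_length.2 (fun a ha => (List.all_eq_true).1 h a ha)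
    omega

theorem pv_all_zip_iff (s : List Char) (g : Char × Char → Bool) :
    (s.zip s.tail).all g = true ↔ ∀ (i : Nat), i + 1 < s.length → g (s.getD i ' ', s.getD (i + 1) ' ') = true := by
  have hz : (s.zip s.tail).length = s.length - 1 := by
    rcases s with _ | ⟨c, t⟩ <;> simp [List.length_zip]
  rw [List.all_eq_true]
  constructor
  · intro h i hi
    have hiz : i < (s.zip s.tail).length := by omega
    have := h ((s.zip s.tail)[i]) (List.getElem_mem hiz)
    rw [List.getElem_zip, List.getElem_tail] at this
    rwa [List.getD_eq_getElem _ _ (by omega), List.getD_eq_getElem _ _ (by omega)]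
  · intro h p hp
    obtain ⟨i, hi, rfl⟩ := List.mem_iff_getElem.1 hp
    rw [List.getElem_zip, List.getElem_tail]
    have := h i (by omega)
    rwa [List.getD_eq_getElem _ _ (by omega), List.getD_eq_getElem _ _ (by omega)] at this

theorem pv_decW_eq_dec (n : Int) (h : 100 ≤ n) :
    ((PySem.Int.toChars n).zip (PySem.Int.toChars n).tail).all pvDecW
      = ((PySem.Int.toChars n).zip (PySem.Int.toChars n).tail).all pvDecP := by
  set s := PySem.Int.toChars n with hs
  have hlen := pv_len3 n h
  rw [← hs] at hlen
  have hbd : ∀ (k : Nat), k < s.length → 0 ≤ pvDv (s.getD k ' ') ∧ pvDv (s.getD k ' ') ≤ 9 := by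
    intro k hk
    rw [List.getD_eq_getElem _ _ hk]
    exact pv_dv_bounds n (by omega) _ (by rw [← hs]; exact List.getElem_mem hk)
  apply Bool.eq_iff_iff.2
  rw [pv_all_zip_iff, pv_all_zip_iff]
  constructor
  · intro H i hi
    have Hi := H i hi
    dsimp only [pvDecW] at Hi
    dsimp only [pvDecP]
    rcases Bool.or_eq_true_iff.1 Hi with hd | hw
    · exact hd
    · exfalso
      simp only [Bool.and_eq_true, beq_iff_eq] at hw
      obtain ⟨hw1, hw2⟩ := hw
      by_cases hlast : i + 2 < s.length
      · have Hn := H (i + 1) (by omega)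
        dsimp only [pvDecW] at Hn
        rw [show i + 1 + 1 = i + 2 by omega] at Hn
        rcases Bool.or_eq_true_iff.1 Hn with hd' | hw'
        · simp only [beq_iff_eq] at hd'
          have := (hbd (i + 2) (by omega)).1
          omega
        · simp only [Bool.and_eq_true, beq_iff_eq] at hw'
          omega
      · have hi1 : 1 ≤ i := by omega
        have Hp := H (i - 1) (by omega)
        rw [show i - 1 + 1 = i by omega] at Hp
        dsimp only [pvDecW] at Hp
        rcases Bool.or_eq_true_iff.1 Hp with hd' | hw'
        · simp only [beq_iff_eq] at hd'
          have := (hbd (i - 1) (by omega)).2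
          omega
        · simp only [Bool.and_eq_true, beq_iff_eq] at hw'
          omega
  · intro H i hi
    have Hi := H i hi
    dsimp only [pvDecP] at Hi
    dsimp only [pvDecW]
    exact Bool.or_eq_true_iff.2 (Or.inl Hi)

theorem pv_count_contains (aws : List Int) (n : Int) :
    (PySem.List.count aws n > 0) ↔ aws.contains n = true := by
  rw [PySem.List.count_eq]
  simp [List.count_pos_iff]

-- structure of the pattern constants
theorem pvINC_getD : ∀ j : Nat, j < 19 → pvINC.getD j ' ' = Nat.digitChar ((j + 1) % 10) := by decide

theorem pvDEC_getD : ∀ j : Nat, j < 10 → pvDEC.getD j ' ' = Nat.digitChar (9 - j) := by decide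

theorem pvINC_pair : ∀ j : Nat, j < 18 → pvInc (pvINC.getD j ' ', pvINC.getD (j + 1) ' ') = true := by decide

theorem pvDEC_pair : ∀ j : Nat, j < 9 → pvDecP (pvDEC.getD j ' ', pvDEC.getD (j + 1) ' ') = true := by decide

theorem pvINC_len : pvINC.length = 19 := by decide

theorem pvDEC_len : pvDEC.length = 10 := by decide

-- digit value at an index of a digit string, as an explicit Nat
theorem pv_getD_digit (s : List Char) (hd : pvDigitStr s) (i : Nat) (hi : i < s.length) :
    ∃ k : Nat, k < 10 ∧ s.getD i ' ' = Nat.digitChar k ∧ pvDv (s.getD i ' ') = (k : Int) := by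
  obtain ⟨k, hk, he⟩ := hd (s.getD i ' ') (by rw [List.getD_eq_getElem _ _ hi]; exact List.getElem_mem hi)
  exact ⟨k, hk, he, by rw [he]; exact pv_dv_digitChar k hk⟩

-- an element of an infix window equals the corresponding element of the whole
theorem pv_infix_getD (s t p q : List Char) (hpq : p ++ s ++ q = t) (j : Nat) (hj : j < s.length) :
    s.getD j ' ' = t.getD (p.length + j) ' ' := by
  subst hpq
  rw [List.getD_eq_getElem s _ hj,
      List.getD_eq_getElem _ _ (by simp; omega)]
  rw [List.getElem_append_left (by simp; omega), List.getElem_append_right (by omega)]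
  simp

theorem pv_isIn_inc_iff (s : List Char) (hd : pvDigitStr s)
    (h3 : 3 ≤ s.length) (h10 : s.length ≤ 10) :
    PySem.Chars.isIn s pvINC = true ↔ (s.zip s.tail).all pvInc = true := by
  rw [PySem.Chars.isIn_iff_infix, pv_all_zip_iff]
  constructor
  · rintro ⟨p, q, hpq⟩
    have hlt : p.length + (s.length + q.length) = 19 := by
      have := congrArg List.length hpq
      simpa [pvINC_len] using this
    intro i hi
    rw [pv_infix_getD s pvINC p q hpq i (by omega),
        pv_infix_getD s pvINC p q hpq (i + 1) hi,
        show p.length + (i + 1) = (p.length + i) + 1 from rfl]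
    exact pvINC_pair (p.length + i) (by omega)
  · intro hall
    -- digit at index i, closed form (f + i) % 10
    obtain ⟨f, hf10, hf, hfv⟩ := pv_getD_digit s hd 0 (by omega)
    have hclosed : ∀ i, i < s.length → s.getD i ' ' = Nat.digitChar ((f + i) % 10) := by
      intro i
      induction i with
      | zero => intro _; rw [show (f + 0) % 10 = f by omega]; simpa using hf
      | succ m ih =>
        intro hm
        obtain ⟨a, ha10, hae, hav⟩ := pv_getD_digit s hd m (by omega)
        obtain ⟨b, hb10, hbe, hbv⟩ := pv_getD_digit s hd (m + 1) hm
        have hp := hall m hm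
        dsimp only [pvInc] at hp
        rw [hav, hbv] at hp
        have ham : a = (f + m) % 10 := by
          have := ih (by omega)
          rw [hae] at this
          have h2 : pvDv (Nat.digitChar a) = pvDv (Nat.digitChar ((f + m) % 10)) := by rw [this]
          rw [pv_dv_digitChar a ha10, pv_dv_digitChar _ (by omega)] at h2
          exact_mod_cast h2
        have hb : b = (f + (m + 1)) % 10 := by
          simp only [Bool.or_eq_true, Bool.and_eq_true, beq_iff_eq] at hp
          rcases hp with h1 | ⟨h9, h0⟩ <;> omega
        rw [hbe, hb]
    set k := (f + 9) % 10 with hk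
    have hk9 : k ≤ 9 := by omega
    have hpre : s <+: pvINC.drop k := by
      rw [List.prefix_iff_eq_take]
      apply List.ext_getElem
      · simp [pvINC_len]; omega
      · intro i hi1 hi2
        have hi : i < s.length := hi1
        have hki : k + i < 19 := by omega
        rw [List.getElem_take, List.getElem_drop]
        have e : s.getD i ' ' = pvINC.getD (k + i) ' ' := by
          rw [hclosed i hi, pvINC_getD (k + i) hki]
          congr 1
          omega
        rw [List.getD_eq_getElem _ _ hi,
            List.getD_eq_getElem _ _ (show k + i < pvINC.length by rw [pvINC_len]; exact hki)] at e
        exact e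
    exact List.infix_iff_prefix_suffix.2 ⟨pvINC.drop k, hpre, List.drop_suffix _ _⟩

theorem pv_isIn_dec_iff (s : List Char) (hd : pvDigitStr s)
    (h3 : 3 ≤ s.length) (h10 : s.length ≤ 10) :
    PySem.Chars.isIn s pvDEC = true ↔ (s.zip s.tail).all pvDecP = true := by
  rw [PySem.Chars.isIn_iff_infix, pv_all_zip_iff]
  constructor
  · rintro ⟨p, q, hpq⟩
    have hlt : p.length + (s.length + q.length) = 10 := by
      have := congrArg List.length hpq
      simpa [pvDEC_len] using this
    intro i hi
    rw [pv_infix_getD s pvDEC p q hpq i (by omega),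
        pv_infix_getD s pvDEC p q hpq (i + 1) hi,
        show p.length + (i + 1) = (p.length + i) + 1 from rfl]
    exact pvDEC_pair (p.length + i) (by omega)
  · intro hall
    obtain ⟨f, hf10, hf, hfv⟩ := pv_getD_digit s hd 0 (by omega)
    -- digits decrease by exactly one: d i = f - i, and f ≥ i
    have hclosed : ∀ i, i < s.length → i ≤ f ∧ s.getD i ' ' = Nat.digitChar (f - i) := by
      intro i
      induction i with
      | zero => intro _; exact ⟨Nat.zero_le f, by simpa using hf⟩
      | succ m ih =>
        intro hm
        obtain ⟨hmf, hme⟩ := ih (by omega)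
        obtain ⟨a, ha10, hae, hav⟩ := pv_getD_digit s hd m (by omega)
        obtain ⟨b, hb10, hbe, hbv⟩ := pv_getD_digit s hd (m + 1) hm
        have hp := hall m hm
        dsimp only [pvDecP] at hp
        rw [hav, hbv] at hp
        simp only [beq_iff_eq] at hp
        have ham : a = f - m := by
          rw [hae] at hme
          have h2 : pvDv (Nat.digitChar a) = pvDv (Nat.digitChar (f - m)) := by rw [hme]
          rw [pv_dv_digitChar a ha10, pv_dv_digitChar _ (by omega)] at h2
          exact_mod_cast h2
        have hb : b = f - (m + 1) ∧ m + 1 ≤ f := by omega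
        exact ⟨hb.2, by rw [hbe, hb.1]⟩
    have hfL : s.length ≤ f + 1 := by
      have := (hclosed (s.length - 1) (by omega)).1
      omega
    set k := 9 - f with hk
    have hpre : s <+: pvDEC.drop k := by
      rw [List.prefix_iff_eq_take]
      apply List.ext_getElem
      · simp [pvDEC_len]; omega
      · intro i hi1 hi2
        have hi : i < s.length := hi1
        have hki : k + i < 10 := by omega
        rw [List.getElem_take, List.getElem_drop]
        have e : s.getD i ' ' = pvDEC.getD (k + i) ' ' := by
          rw [(hclosed i hi).2, pvDEC_getD (k + i) hki]
          congr 1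
          omega
        rw [List.getD_eq_getElem _ _ hi,
            List.getD_eq_getElem _ _ (show k + i < pvDEC.length by rw [pvDEC_len]; exact hki)] at e
        exact e
    exact List.infix_iff_prefix_suffix.2 ⟨pvDEC.drop k, hpre, List.drop_suffix _ _⟩

-- the three non-trivial B-tests, at the level of A's counters (n in [100, 2^31 + 2])
theorem pv_B_zero_iff (n : Int) (h : 100 ≤ n) :
    (PySem.List.slice (PySem.Int.toChars n) (some 1) none
        = List.replicate (PySem.List.len (PySem.Int.toChars n) - 1).toNat '0')
      ↔ pvA_kNull (PySem.Int.toChars n) = PySem.List.len (PySem.Int.toChars n) - 1 := by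
  set s := PySem.Int.toChars n with hs
  have hlen := pv_len3 n h
  rw [← hs] at hlen
  have htn : (PySem.List.len s - 1).toNat = s.length - 1 := by
    rw [PySem.List.len_eq]; omega
  rw [PySem.List.slice_from_one, htn, pv_kNull_eq, PySem.List.len_eq,
      List.eq_replicate_iff]
  have htl : s.tail.length = s.length - 1 := by simp
  have hle := List.countP_le_length (p := fun c => c == '0') (l := s.tail)
  constructor
  · rintro ⟨_, hall⟩
    have : ∀ c ∈ s.tail, (c == '0') = true := by
      intro c hc
      simp only [beq_iff_eq]
      exact hall c hc
    have := List.countP_eq_length.2 this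
    omega
  · intro hcnt
    refine ⟨htl, ?_⟩
    intro c hc
    have hcnt' : List.countP (fun c => c == '0') s.tail = s.tail.length := by omega
    have := List.countP_eq_length.1 hcnt' c hc
    simpa using this

theorem pv_B_inc_iff (n : Int) (h : 100 ≤ n) (h2 : n ≤ 2147483650) :
    PySem.Chars.isIn (PySem.Int.toChars n) pvINC = true
      ↔ pvA_kInc (PySem.Int.toChars n) = PySem.List.len (PySem.Int.toChars n) - 1 := by
  set s := PySem.Int.toChars n with hs
  have hlen : 3 ≤ s.length := by rw [hs]; exact pv_len3 n h
  have hne : s ≠ [] := by intro he; rw [he] at hlen; simp at hlen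
  rw [pv_kInc_eq, pv_count_all s hne,
      pv_isIn_inc_iff s (by rw [hs]; exact pv_digitStr n (by omega)) hlen
        (by rw [hs]; exact pv_len10 n (by omega) h2)]

theorem pv_B_dec_iff (n : Int) (h : 100 ≤ n) (h2 : n ≤ 2147483650) :
    PySem.Chars.isIn (PySem.Int.toChars n) pvDEC = true
      ↔ pvA_kDec (PySem.Int.toChars n) = PySem.List.len (PySem.Int.toChars n) - 1 := by
  set s := PySem.Int.toChars n with hs
  have hlen : 3 ≤ s.length := by rw [hs]; exact pv_len3 n h
  have hne : s ≠ [] := by intro he; rw [he] at hlen; simp at hlen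
  rw [pv_kDec_eq, pv_count_all s hne,
      pv_isIn_dec_iff s (by rw [hs]; exact pv_digitStr n (by omega)) hlen
        (by rw [hs]; exact pv_len10 n (by omega) h2)]

theorem pv_B_decW_iff (n : Int) (h : 100 ≤ n) (h2 : n ≤ 2147483650) :
    PySem.Chars.isIn (PySem.Int.toChars n) pvDEC = true
      ↔ pvA_kDecWrap (PySem.Int.toChars n) = PySem.List.len (PySem.Int.toChars n) - 1 := by
  have hlen := pv_len3 n h
  have hne : PySem.Int.toChars n ≠ [] := by intro he; rw [he] at hlen; simp at hlen
  rw [pv_B_dec_iff n h h2, pv_kDec_eq, pv_kDecW_eq, pv_count_all _ hne, pv_count_all _ hne,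
      pv_decW_eq_dec n h]

theorem pv_check1_eq_B (n : Int) (aws : List Int) (h : 100 ≤ n) (h2 : n ≤ 2147483650) :
    pvA_check1 n aws = pvB_interesting n aws := by
  have hn : ¬ n < 100 := by omega
  simp only [pvA_check1, pvB_interesting, if_neg hn]
  by_cases c1 : pvA_kNull (PySem.Int.toChars n) = PySem.List.len (PySem.Int.toChars n) - 1
  · rw [if_pos c1, decide_eq_true ((pv_B_zero_iff n h).2 c1)]
    simp
  · rw [if_neg c1, decide_eq_false (fun hh => c1 ((pv_B_zero_iff n h).1 hh))]
    by_cases c2 : (PySem.List.slice? (PySem.Int.toChars n) none none (-1)).getD [] = PySem.Int.toChars n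
    · rw [if_pos c2, decide_eq_true (Eq.symm c2)]
      simp
    · rw [if_neg c2, decide_eq_false (fun hh => c2 (Eq.symm hh))]
      by_cases c3 : pvA_kInc (PySem.Int.toChars n) = PySem.List.len (PySem.Int.toChars n) - 1
      · rw [if_pos c3, (pv_B_inc_iff n h h2).2 c3]
        simp
      · rw [if_neg c3]
        have d3 : PySem.Chars.isIn (PySem.Int.toChars n) pvINC = false := by
          rw [← Bool.not_eq_true]
          exact fun hh => c3 ((pv_B_inc_iff n h h2).1 hh)
        rw [d3]
        by_cases c4 : pvA_kDec (PySem.Int.toChars n) = PySem.List.len (PySem.Int.toChars n) - 1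
        · rw [if_pos c4, (pv_B_dec_iff n h h2).2 c4]
          simp
        · rw [if_neg c4]
          have d4 : PySem.Chars.isIn (PySem.Int.toChars n) pvDEC = false := by
            rw [← Bool.not_eq_true]
            exact fun hh => c4 ((pv_B_dec_iff n h h2).1 hh)
          rw [d4]
          by_cases c5 : PySem.List.count aws n > 0
          · rw [if_pos c5, (pv_count_contains aws n).1 c5]
            simp
          · rw [if_neg c5]
            have d5 : aws.contains n = false := by
              rw [← Bool.not_eq_true]
              exact fun hh => c5 ((pv_count_contains aws n).2 hh)
            rw [d5]
            simp

theorem pv_B_false_of_lt (n : Int) (aws : List Int) (h : n < 100) : pvB_interesting n aws = false := by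
  simp only [pvB_interesting, if_pos h]

theorem pv_B_100 (aws : List Int) : pvB_interesting 100 aws = true := by
  have h : decide (PySem.List.slice (PySem.Int.toChars 100) (some 1) none
      = List.replicate (PySem.List.len (PySem.Int.toChars 100) - 1).toNat '0') = true := by decide
  simp only [pvB_interesting]
  rw [if_neg (by norm_num), h]
  simp

theorem pv_A_main (number : Int) (aws : List Int) (h1 : ¬ number < 98) (h2 : ¬ (number = 99 ∨ number = 98))
    (hhi : number ≤ 2147483650) :
    is_interesting number aws
      = (if pvB_interesting number aws then 2
         else if pvA_check1 (number + 1) aws then 1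
         else if pvA_check1 (number + 2) aws then 1 else 0) := by
  have h100 : 100 ≤ number := by omega
  have hn : ¬ number < 100 := by omega
  simp only [is_interesting, pvB_interesting, if_neg h1, if_neg h2, if_neg hn]
  by_cases c1 : pvA_kNull (PySem.Int.toChars number) = PySem.List.len (PySem.Int.toChars number) - 1
  · rw [if_pos c1, decide_eq_true ((pv_B_zero_iff number h100).2 c1)]
    simp
  · rw [if_neg c1, decide_eq_false (fun hh => c1 ((pv_B_zero_iff number h100).1 hh))]
    by_cases c2 : (PySem.List.slice? (PySem.Int.toChars number) none none (-1)).getD [] = PySem.Int.toChars number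
    · rw [if_pos c2, decide_eq_true (Eq.symm c2)]
      simp
    · rw [if_neg c2, decide_eq_false (fun hh => c2 (Eq.symm hh))]
      by_cases c3 : pvA_kInc (PySem.Int.toChars number) = PySem.List.len (PySem.Int.toChars number) - 1
      · rw [if_pos c3, (pv_B_inc_iff number h100 hhi).2 c3]
        simp
      · rw [if_neg c3]
        have d3 : PySem.Chars.isIn (PySem.Int.toChars number) pvINC = false := by
          rw [← Bool.not_eq_true]
          exact fun hh => c3 ((pv_B_inc_iff number h100 hhi).1 hh)
        rw [d3]
        by_cases c4 : pvA_kDecWrap (PySem.Int.toChars number) = PySem.List.len (PySem.Int.toChars number) - 1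
        · rw [if_pos c4, (pv_B_decW_iff number h100 hhi).2 c4]
          simp
        · rw [if_neg c4]
          have d4 : PySem.Chars.isIn (PySem.Int.toChars number) pvDEC = false := by
            rw [← Bool.not_eq_true]
            exact fun hh => c4 ((pv_B_decW_iff number h100 hhi).1 hh)
          rw [d4]
          by_cases c5 : PySem.List.count aws number > 0
          · rw [if_pos c5, (pv_count_contains aws number).1 c5]
            simp
          · rw [if_neg c5]
            have d5 : aws.contains number = false := by
              rw [← Bool.not_eq_true]
              exact fun hh => c5 ((pv_count_contains aws number).2 hh)
            rw [d5]
            simp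

theorem pv_alt_any (number : Int) (aws : List Int) :
    is_interesting_alt number aws
      = (if pvB_interesting number aws then 2
         else if pvB_interesting (number + 1) aws || pvB_interesting (number + 2) aws then 1 else 0) := by
  simp [is_interesting_alt, List.any]

theorem pv_main (number : Int) (aws : List Int) (hhi : number ≤ 2147483648) :
    is_interesting number aws = is_interesting_alt number aws := by
  rw [pv_alt_any]
  by_cases h1 : number < 98
  · simp only [is_interesting, if_pos h1,
      pv_B_false_of_lt number aws (by omega), pv_B_false_of_lt (number + 1) aws (by omega),
      pv_B_false_of_lt (number + 2) aws (by omega)]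
    simp
  · by_cases h2 : number = 99 ∨ number = 98
    · have hB : pvB_interesting number aws = false := by
        rcases h2 with h | h <;> exact pv_B_false_of_lt number aws (by omega)
      have hA : is_interesting number aws = 1 := by
        rcases h2 with h | h <;> subst h <;> norm_num [is_interesting]
      have hor : (pvB_interesting (number + 1) aws || pvB_interesting (number + 2) aws) = true := by
        rcases h2 with h | h <;> subst h
        · have : pvB_interesting (99 + 1) aws = true := by
            rw [show (99 : Int) + 1 = 100 by norm_num]; exact pv_B_100 aws
          rw [this]; simp
        · have : pvB_interesting (98 + 2) aws = true := by
            rw [show (98 : Int) + 2 = 100 by norm_num]; exact pv_B_100 aws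
          rw [this]; simp
      rw [hA, hB, hor]
      simp
    · rw [pv_A_main number aws h1 h2 (by omega),
          pv_check1_eq_B (number + 1) aws (by omega) (by omega),
          pv_check1_eq_B (number + 2) aws (by omega) (by omega)]
      by_cases hb : pvB_interesting number aws = true
      · rw [if_pos hb, if_pos hb]
      · rw [if_neg hb, if_neg hb]
        cases hb1 : pvB_interesting (number + 1) aws <;> cases hb2 : pvB_interesting (number + 2) aws <;> simp

-- ===== VERDICT (by name: the statement is the Claim_ definition above) =====
theorem is_interesting_spec : Claim_equal_is_interesting := by
  intro number aws hdom
  unfold Spec_is_interesting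
  have hhi : number ≤ 2147483648 := by
    simp only [Dom_is_interesting, Bool.and_eq_true, pvDomInt, decide_eq_true_eq] at hdom
    exact hdom.1.2
  exact pv_main number aws hhi
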